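-- pv_equiv track=rewrite | github.com/vakansie/aoc_2024 | day5.py | check_if_ordered
-- ===== SOURCE A (Python) =====
-- def check_if_ordered(rules, pages_list):
--     ordered_pages = []
--     for pages in pages_list:
--         ordered = True
--         for index, page in enumerate(pages):
--             for rule in rules:
--                 if page == rule[0]:
--                     if rule[1] in pages[:index]:
--                         ordered = False
--                 if page == rule[1]:
--                     if rule[0] in pages[index+1:]:
--                         ordered = False
--         if ordered:
--             ordered_pages.append(pages)
--     middle_sum = sum([pages[int((len(pages) - 1) / 2)] for pages in ordered_pages])
--     return middle_sum, ordered_pages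
-- ===== SOURCE B (Python) =====
-- def check_if_ordered(rules, pages_list):
--     middle_sum = 0
--     ordered_pages = []
--     for pages in pages_list:
--         rev = pages[::-1]
--         n = len(pages)
--         for a, b in rules:
--             if a in pages and b in pages and pages.index(b) < n - 1 - rev.index(a):
--                 break
--         else:
--             ordered_pages.append(pages)
--             middle_sum += pages[(n - 1) // 2]
--     return middle_sum, ordered_pages
-- ===== Notes on version B (the rewrite author's own statement) =====
-- stated objective: faster
-- what changed: B replaces A's triple loop (per position x per rule, a slice+membership scan) with a per-rule check comparing the first index of rule[1] against the last index of rule[0] (via pages.index and a reversed-list index), and accumulates the middle sum in the same pass instead of a second comprehension.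
import Mathlib
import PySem

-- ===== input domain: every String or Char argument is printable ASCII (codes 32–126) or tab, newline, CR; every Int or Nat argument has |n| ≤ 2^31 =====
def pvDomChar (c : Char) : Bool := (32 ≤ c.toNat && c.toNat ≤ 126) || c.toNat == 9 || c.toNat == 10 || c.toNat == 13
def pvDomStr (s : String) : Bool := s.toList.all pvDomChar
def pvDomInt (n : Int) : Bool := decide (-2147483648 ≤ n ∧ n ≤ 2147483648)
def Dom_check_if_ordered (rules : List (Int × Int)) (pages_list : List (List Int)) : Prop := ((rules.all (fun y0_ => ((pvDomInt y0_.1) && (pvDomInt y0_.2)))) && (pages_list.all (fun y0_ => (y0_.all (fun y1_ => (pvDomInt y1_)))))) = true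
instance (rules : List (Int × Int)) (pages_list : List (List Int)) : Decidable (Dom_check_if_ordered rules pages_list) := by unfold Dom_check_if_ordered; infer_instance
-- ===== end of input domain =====

-- B replaces A's per-position×per-rule slice scans by one first-index/last-index comparison
-- per rule and accumulates the middle sum in the same pass (objective: faster).

-- ===== PORT A =====
-- `int((len(pages)-1)/2)`: true division then truncation toward zero = Int.tdiv.
def check_if_ordered (rules : List (Int × Int)) (pages_list : List (List Int)) : Int × List (List Int) :=
  let ordered_pages := pages_list.foldl (fun acc pages =>
    let ordered := (PySem.List.enumerate pages 0).foldl (fun ord ip =>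
      rules.foldl (fun ord rule =>
        let ord := if ip.2 = rule.1 then
            (if rule.2 ∈ PySem.List.slice pages none (some ip.1) then false else ord)
          else ord
        if ip.2 = rule.2 then
          (if rule.1 ∈ PySem.List.slice pages (some (ip.1 + 1)) none then false else ord)
        else ord) ord) true
    if ordered then acc ++ [pages] else acc) []
  -- pages[…] : pyGetD's default is reached only on an empty pages, where Python raises (outside Pre_)
  let middle_sum := (ordered_pages.map (fun pages =>
    PySem.List.pyGetD pages (((pages.length : Int) - 1).tdiv 2) 0)).sum
  (middle_sum, ordered_pages)

-- ===== PORT B =====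
-- `pages[::-1]` is List.reverse (PySem.List.slice?_none_none_neg_one); `.index` is guarded by
-- the membership tests, so `(index? …).getD 0` never takes its default when tested.
def pvBad (pages rev : List Int) (n : Int) (r : Int × Int) : Bool :=
  r.1 ∈ pages && r.2 ∈ pages &&
    decide ((((PySem.List.index? pages r.2).getD 0 : Nat) : Int) <
            n - 1 - (((PySem.List.index? rev r.1).getD 0 : Nat) : Int))

def check_if_ordered_alt (rules : List (Int × Int)) (pages_list : List (List Int)) : Int × List (List Int) :=
  pages_list.foldl (fun acc pages =>
    let rev := pages.reverse
    let n : Int := pages.length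
    if rules.any (pvBad pages rev n) then acc
    else (acc.1 + PySem.List.pyGetD pages (PySem.Int.floordiv (n - 1) 2) 0, acc.2 ++ [pages]))
    (0, [])

-- ===== PRECONDITION & SPEC =====
-- Pre_ excludes exactly the inputs where Python A raises: an empty pages list is always
-- "ordered", and indexing its middle raises IndexError (B raises there too).
def Pre_check_if_ordered (rules : List (Int × Int)) (pages_list : List (List Int)) : Prop :=
  [] ∉ pages_list
instance (rules : List (Int × Int)) (pages_list : List (List Int)) : Decidable (Pre_check_if_ordered rules pages_list) := by unfold Pre_check_if_ordered; infer_instance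

def pvWitness_check_if_ordered : (List (Int × Int)) × List (List Int) :=
  ([(47, 53), (61, 13)], [[75, 47, 61], [13, 61, 75]])

def Spec_check_if_ordered (rules : List (Int × Int)) (pages_list : List (List Int)) (out : Int × List (List Int)) : Prop := out = check_if_ordered_alt rules pages_list
instance (rules : List (Int × Int)) (pages_list : List (List Int)) (out : Int × List (List Int)) : Decidable (Spec_check_if_ordered rules pages_list out) := by unfold Spec_check_if_ordered; infer_instance

-- ===== CLAIM (what is proved, stated in full; the proofs are below) =====
def Claim_equal_check_if_ordered : Prop := ∀ (rules : List (Int × Int)) (pages_list : List (List Int)), Dom_check_if_ordered rules pages_list → Pre_check_if_ordered rules pages_list → Spec_check_if_ordered rules pages_list (check_if_ordered rules pages_list)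

-- ===== LEMMAS AND PROOFS =====

-- helper notions used only by the proofs
def pvCondA (pages : List Int) (ip : Int × Int) (rule : Int × Int) : Bool :=
  (decide (ip.2 = rule.1) && decide (rule.2 ∈ PySem.List.slice pages none (some ip.1))) ||
  (decide (ip.2 = rule.2) && decide (rule.1 ∈ PySem.List.slice pages (some (ip.1 + 1)) none))

def pvViol (pages : List Int) (a b : Int) : Prop :=
  ∃ i j : Nat, i < j ∧ pages[i]? = some b ∧ pages[j]? = some a

theorem pv_foldl_and {α : Type} (l : List α) (h : α → Bool) (b : Bool) :
    l.foldl (fun ord x => ord && h x) b = (b && l.all h) := by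
  induction l generalizing b with
  | nil => simp
  | cons x xs ih => simp [List.foldl_cons, ih, Bool.and_assoc]

theorem pv_step_eq (pages : List Int) (ip rule : Int × Int) (ord : Bool) :
    (let ord' := if ip.2 = rule.1 then (if rule.2 ∈ PySem.List.slice pages none (some ip.1) then false else ord) else ord;
     if ip.2 = rule.2 then (if rule.1 ∈ PySem.List.slice pages (some (ip.1 + 1)) none then false else ord') else ord')
    = (ord && !pvCondA pages ip rule) := by
  simp only [pvCondA]
  split_ifs <;> simp_all

theorem pv_foldl_congr {α β : Type} (l : List α) (f g : β → α → β) (init : β)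
    (h : ∀ b x, f b x = g b x) : l.foldl f init = l.foldl g init := by
  have hfg : f = g := funext fun b => funext (h b)
  rw [hfg]

theorem pv_condA_iff (pages : List Int) (r : Int × Int) :
    (∃ ip ∈ PySem.List.enumerate pages 0, pvCondA pages ip r = true) ↔ pvViol pages r.1 r.2 := by
  constructor
  · rintro ⟨ip, hip, hc⟩
    rw [PySem.List.mem_enumerate_iff] at hip
    obtain ⟨k, hk, rfl⟩ := hip
    simp only [pvCondA, zero_add, Bool.or_eq_true, Bool.and_eq_true, decide_eq_true_eq,
      PySem.List.slice_to_natCast] at hc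
    rcases hc with ⟨ha, hb⟩ | ⟨hb, ha⟩
    · obtain ⟨i, hi, hig⟩ := List.mem_iff_getElem.mp hb
      have hik : i < k := lt_of_lt_of_le hi (by simp [List.length_take])
      refine ⟨i, k, hik, ?_, ?_⟩
      · rw [List.getElem?_eq_getElem (by simp at hi; omega)]
        rw [List.getElem_take] at hig; simp [hig]
      · simp [List.getElem?_eq_getElem hk, ha]
    · have hslice : PySem.List.slice pages (some ((k : Int) + 1)) none = pages.drop (k + 1) := by
        have hcast : ((k : Int) + 1) = ((k + 1 : Nat) : Int) := by push_cast; ring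
        rw [hcast, PySem.List.slice_from_natCast]
      rw [hslice] at ha
      obtain ⟨m, hm, hmg⟩ := List.mem_iff_getElem.mp ha
      rw [List.getElem_drop] at hmg
      refine ⟨k, k + 1 + m, by omega, ?_, ?_⟩
      · simp [List.getElem?_eq_getElem hk, hb]
      · rw [List.getElem?_eq_getElem (by simp at hm; omega)]
        simp [hmg]
  · rintro ⟨i, j, hij, hi, hj⟩
    rw [List.getElem?_eq_some_iff] at hi hj
    obtain ⟨hilen, hig⟩ := hi
    obtain ⟨hjlen, hjg⟩ := hj
    refine ⟨((j : Int), pages[j]), ?_, ?_⟩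
    · rw [PySem.List.mem_enumerate_iff]
      exact ⟨j, hjlen, by simp⟩
    · simp only [pvCondA, Bool.or_eq_true, Bool.and_eq_true, decide_eq_true_eq,
        PySem.List.slice_to_natCast]
      left
      refine ⟨hjg, ?_⟩
      rw [List.mem_iff_getElem]
      exact ⟨i, by simp [List.length_take]; omega, by rw [List.getElem_take]; exact hig⟩

theorem pv_bad_iff (pages : List Int) (r : Int × Int) :
    pvBad pages pages.reverse (pages.length : Int) r = true ↔ pvViol pages r.1 r.2 := by
  constructor
  · intro h
    simp only [pvBad, Bool.and_eq_true, decide_eq_true_eq] at h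
    obtain ⟨⟨ha, hb⟩, hlt⟩ := h
    obtain ⟨ib, hib⟩ := Option.isSome_iff_exists.mp
      ((PySem.List.index?_isSome_iff pages r.2).mpr hb)
    obtain ⟨ja, hja⟩ := Option.isSome_iff_exists.mp
      ((PySem.List.index?_isSome_iff pages.reverse r.1).mpr (List.mem_reverse.mpr ha))
    rw [hib, hja] at hlt
    simp only [Option.getD_some] at hlt
    obtain ⟨hiblen, hibget, _⟩ := PySem.List.getElem_of_index?_eq_some hib
    obtain ⟨hjalen, hjaget, _⟩ := PySem.List.getElem_of_index?_eq_some hja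
    rw [List.length_reverse] at hjalen
    refine ⟨ib, pages.length - 1 - ja, by omega, ?_, ?_⟩
    · simp [List.getElem?_eq_getElem hiblen, hibget]
    · rw [List.getElem_reverse] at hjaget
      rw [List.getElem?_eq_getElem (by omega)]
      simp [hjaget]
  · rintro ⟨i, j, hij, hi, hj⟩
    rw [List.getElem?_eq_some_iff] at hi hj
    obtain ⟨hilen, hig⟩ := hi
    obtain ⟨hjlen, hjg⟩ := hj
    have ha : r.1 ∈ pages := hjg ▸ List.getElem_mem hjlen
    have hb : r.2 ∈ pages := hig ▸ List.getElem_mem hilen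
    obtain ⟨ib, hib⟩ := Option.isSome_iff_exists.mp
      ((PySem.List.index?_isSome_iff pages r.2).mpr hb)
    obtain ⟨ja, hja⟩ := Option.isSome_iff_exists.mp
      ((PySem.List.index?_isSome_iff pages.reverse r.1).mpr (List.mem_reverse.mpr ha))
    obtain ⟨hiblen, _, hibmin⟩ := PySem.List.getElem_of_index?_eq_some hib
    obtain ⟨hjalen, _, hjamin⟩ := PySem.List.getElem_of_index?_eq_some hja
    rw [List.length_reverse] at hjalen
    have hible : ib ≤ i := by
      by_contra hcon
      exact hibmin i (by omega) hig
    have hjage : j ≤ pages.length - 1 - ja := by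
      by_contra hcon
      have h1 : pages.length - 1 - j < ja := by omega
      refine hjamin (pages.length - 1 - j) (by omega) ?_
      rw [List.getElem_reverse]
      have h2 : pages.length - 1 - (pages.length - 1 - j) = j := by omega
      simp only [h2]
      exact hjg
    simp only [pvBad, Bool.and_eq_true, decide_eq_true_eq, hib, hja, Option.getD_some]
    exact ⟨⟨ha, hb⟩, by omega⟩

theorem pv_ordered_eq (rules : List (Int × Int)) (pages : List Int) :
    ((PySem.List.enumerate pages 0).foldl (fun ord ip =>
      rules.foldl (fun ord rule =>
        let ord := if ip.2 = rule.1 then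
            (if rule.2 ∈ PySem.List.slice pages none (some ip.1) then false else ord)
          else ord
        if ip.2 = rule.2 then
          (if rule.1 ∈ PySem.List.slice pages (some (ip.1 + 1)) none then false else ord)
        else ord) ord) true)
    = !(rules.any (pvBad pages pages.reverse (pages.length : Int))) := by
  have hinner : ∀ (ord : Bool) (ip : Int × Int), (rules.foldl (fun ord rule =>
        let ord := if ip.2 = rule.1 then
            (if rule.2 ∈ PySem.List.slice pages none (some ip.1) then false else ord)
          else ord
        if ip.2 = rule.2 then
          (if rule.1 ∈ PySem.List.slice pages (some (ip.1 + 1)) none then false else ord)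
        else ord) ord)
      = (ord && rules.all (fun rule => !pvCondA pages ip rule)) := by
    intro ord ip
    rw [← pv_foldl_and]
    exact pv_foldl_congr rules _ _ ord (fun b rule => pv_step_eq pages ip rule b)
  calc ((PySem.List.enumerate pages 0).foldl (fun ord ip =>
      rules.foldl (fun ord rule =>
        let ord := if ip.2 = rule.1 then
            (if rule.2 ∈ PySem.List.slice pages none (some ip.1) then false else ord)
          else ord
        if ip.2 = rule.2 then
          (if rule.1 ∈ PySem.List.slice pages (some (ip.1 + 1)) none then false else ord)
        else ord) ord) true)
      = (PySem.List.enumerate pages 0).foldl (fun ord ip =>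
          ord && rules.all (fun rule => !pvCondA pages ip rule)) true := by
        exact pv_foldl_congr _ _ _ true (fun b ip => hinner b ip)
    _ = (PySem.List.enumerate pages 0).all
          (fun ip => rules.all (fun rule => !pvCondA pages ip rule)) := by
        rw [pv_foldl_and]; simp
    _ = !(rules.any (pvBad pages pages.reverse (pages.length : Int))) := by
        rcases hB : rules.any (pvBad pages pages.reverse (pages.length : Int)) with _ | _
        · simp only [Bool.not_false]
          rw [List.all_eq_true]
          intro ip hip
          rw [List.all_eq_true]
          intro rule hr
          rw [Bool.not_eq_eq_eq_not, Bool.not_true]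
          by_contra hcon
          rw [Bool.not_eq_false] at hcon
          have hv : pvViol pages rule.1 rule.2 := (pv_condA_iff pages rule).mp ⟨ip, hip, hcon⟩
          have hx : rules.any (pvBad pages pages.reverse (pages.length : Int)) = true :=
            List.any_eq_true.mpr ⟨rule, hr, (pv_bad_iff pages rule).mpr hv⟩
          rw [hB] at hx; exact Bool.false_ne_true hx
        · simp only [Bool.not_true]
          obtain ⟨rule, hr, hbad⟩ := List.any_eq_true.mp hB
          obtain ⟨ip, hip, hc⟩ := (pv_condA_iff pages rule).mpr ((pv_bad_iff pages rule).mp hbad)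
          rw [List.all_eq_false]
          refine ⟨ip, hip, ?_⟩
          rw [Bool.not_eq_true, List.all_eq_false]
          exact ⟨rule, hr, by simp [hc]⟩

-- middle value: A's tdiv form equals B's floordiv form (both yield the default 0 on [])
theorem pv_mid_eq (pages : List Int) :
    PySem.List.pyGetD pages (((pages.length : Int) - 1).tdiv 2) 0
    = PySem.List.pyGetD pages (PySem.Int.floordiv ((pages.length : Int) - 1) 2) 0 := by
  rcases pages with _ | ⟨x, xs⟩
  · decide
  · have hlen : (((x :: xs).length : Int)) - 1 = (xs.length : Int) := by simp
    rw [hlen, Int.tdiv_eq_ediv_of_nonneg (by positivity),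
      PySem.Int.floordiv_eq_ediv_of_pos (by norm_num)]

theorem pv_foldA (P : List Int → Bool) (l : List (List Int)) (acc : List (List Int)) :
    l.foldl (fun acc pages => if P pages then acc ++ [pages] else acc) acc = acc ++ l.filter P := by
  induction l generalizing acc with
  | nil => simp
  | cons x xs ih => by_cases h : P x <;> simp [List.foldl_cons, h, ih]

theorem pv_foldB (P : List Int → Bool) (v : List Int → Int) (l : List (List Int))
    (acc : Int × List (List Int)) :
    l.foldl (fun acc pages => if P pages then acc
      else (acc.1 + v pages, acc.2 ++ [pages])) acc
    = (acc.1 + (((l.filter (fun p => !P p)).map v).sum), acc.2 ++ l.filter (fun p => !P p)) := by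
  induction l generalizing acc with
  | nil => simp
  | cons x xs ih =>
    by_cases h : P x
    · simp [List.foldl_cons, h, ih]
    · simp [List.foldl_cons, h, ih]
      ring_nf

-- ===== VERDICT (by name: the statement is the Claim_ definition above) =====
theorem check_if_ordered_spec : Claim_equal_check_if_ordered := by
  intro rules pages_list _hdom _hpre
  unfold Spec_check_if_ordered check_if_ordered check_if_ordered_alt
  simp only []
  have hA : pages_list.foldl (fun acc pages =>
      if (PySem.List.enumerate pages 0).foldl (fun ord ip =>
        rules.foldl (fun ord rule =>
          let ord := if ip.2 = rule.1 then
              (if rule.2 ∈ PySem.List.slice pages none (some ip.1) then false else ord)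
            else ord
          if ip.2 = rule.2 then
            (if rule.1 ∈ PySem.List.slice pages (some (ip.1 + 1)) none then false else ord)
          else ord) ord) true
      then acc ++ [pages] else acc) []
      = pages_list.filter (fun pages => !(rules.any (pvBad pages pages.reverse (pages.length : Int)))) := by
    rw [pv_foldl_congr pages_list _ (fun acc pages =>
        if !(rules.any (pvBad pages pages.reverse (pages.length : Int))) then acc ++ [pages] else acc)
        [] (fun acc pages => by rw [pv_ordered_eq rules pages])]
    exact pv_foldA _ pages_list []
  rw [hA]
  have hB := pv_foldB (fun pages => rules.any (pvBad pages pages.reverse (pages.length : Int)))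
    (fun pages => PySem.List.pyGetD pages (PySem.Int.floordiv ((pages.length : Int) - 1) 2) 0)
    pages_list (0, [])
  rw [hB]
  simp only [Int.zero_add, List.nil_append]
  refine Prod.ext ?_ rfl
  simp only []
  exact congrArg List.sum (List.map_congr_left (fun pages _ => pv_mid_eq pages))
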